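-- pv_equiv track=rewrite | github.com/harshita1804/UCSD | ece143/hw2/hw2q1.py | get_power_of3
-- ===== SOURCE A (Python) =====
-- from itertools import product
--
-- def get_power_of3(x):
--     ''' Input: an integer between 1 to 40 which is t be decomposed
--         Output: Returns the decomposition of the integer'''
--
--     assert(isinstance(x, int))
--     assert(40>=x>=1)
--
--     A = [-1,0,1]
--     combinations = product(A,repeat=4)
--     for z in combinations:
--         s = z[0]*1 + z[1]*3 + z[2]*9 +z[3]*27
--         if(s == x):
--             return list(z)
-- ===== SOURCE B (Python) =====
-- def get_power_of3(x):
--     ''' Input: an integer between 1 to 40 which is to be decomposed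
--         Output: Returns the decomposition of the integer'''
--     assert(isinstance(x, int))
--     assert(40>=x>=1)
--     digits = []
--     for _ in range(4):
--         r = x % 3
--         if r == 2:
--             digits.append(-1)
--             x = (x + 1) // 3
--         else:
--             digits.append(r)
--             x = x // 3
--     return digits
-- ===== Notes on version B (the rewrite author's own statement) =====
-- stated objective: simpler
-- what changed: Replaced the brute-force scan over every tuple of product([-1,0,1],repeat=4) with a direct balanced-ternary digit computation (repeated x%3 with a carry when the remainder is two); Pre_ excludes x outside 1..40, where both asserts make A raise AssertionError and B raises too.
import Mathlib
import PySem

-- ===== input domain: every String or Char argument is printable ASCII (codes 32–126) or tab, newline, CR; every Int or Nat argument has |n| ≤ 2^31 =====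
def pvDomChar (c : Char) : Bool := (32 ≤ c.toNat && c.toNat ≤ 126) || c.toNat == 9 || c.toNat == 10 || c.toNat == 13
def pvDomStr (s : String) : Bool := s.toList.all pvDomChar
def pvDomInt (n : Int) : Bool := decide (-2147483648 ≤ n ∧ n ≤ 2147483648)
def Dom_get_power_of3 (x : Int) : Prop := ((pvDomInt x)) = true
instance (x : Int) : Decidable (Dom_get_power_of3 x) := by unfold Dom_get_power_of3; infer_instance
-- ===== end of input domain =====

-- B replaces A's brute-force scan of all 81 tuples in (-1,0,1)^4 by directly computing the
-- balanced-ternary digits with four mod-3 steps (objective: simpler).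
-- Both asserts are kept: inputs outside 1..40 raise and are excluded by Pre_.

-- ===== PORT A =====
-- combinations = product([-1,0,1], repeat=4), in itertools order (first coordinate slowest)
def pvCombos : List (Int × Int × Int × Int) :=
  [-1,0,1].flatMap (fun a =>
    [-1,0,1].flatMap (fun b =>
      [-1,0,1].flatMap (fun c =>
        [-1,0,1].map (fun d => (a,b,c,d)))))

-- for z in combinations: if z0*1+z1*3+z2*9+z3*27 == x: return list(z)
-- (Python returns None when no tuple matches; that happens only outside Pre_, where the
--  asserts already raise; the port's [] default is never reached inside Pre_.)
def get_power_of3 (x : Int) : List Int :=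
  match pvCombos.find? (fun z => z.1 * 1 + z.2.1 * 3 + z.2.2.1 * 9 + z.2.2.2 * 27 == x) with
  | some (a, b, c, d) => [a, b, c, d]
  | none => []

-- ===== PORT B =====
-- for _ in range(4): r = x % 3; if r == 2: append -1, x = (x+1)//3 else append r, x = x//3
def pvBtLoop : Nat → Int → List Int → List Int
  | 0, _, digits => digits
  | n + 1, x, digits =>
    let r := PySem.Int.mod x 3
    if r == 2 then
      pvBtLoop n (PySem.Int.floordiv (x + 1) 3) (digits ++ [-1])
    else
      pvBtLoop n (PySem.Int.floordiv x 3) (digits ++ [r])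

def get_power_of3_alt (x : Int) : List Int :=
  pvBtLoop 4 x []

-- ===== PRECONDITION & SPEC =====
-- Pre_ excludes exactly the inputs on which A's second assert raises (x outside 1..40).
def Pre_get_power_of3 (x : Int) : Prop := 1 ≤ x ∧ x ≤ 40
instance (x : Int) : Decidable (Pre_get_power_of3 x) := by unfold Pre_get_power_of3; infer_instance

def pvWitness_get_power_of3 : Int := (7)

def Spec_get_power_of3 (x : Int) (out : List Int) : Prop := out = get_power_of3_alt x
instance (x : Int) (out : List Int) : Decidable (Spec_get_power_of3 x out) := by unfold Spec_get_power_of3; infer_instance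

-- ===== CLAIM (what is proved, stated in full; the proofs are below) =====
def Claim_equal_get_power_of3 : Prop := ∀ (x : Int), Dom_get_power_of3 x → Pre_get_power_of3 x → Spec_get_power_of3 x (get_power_of3 x)

-- ===== LEMMAS AND PROOFS =====

-- ===== VERDICT (by name: the statement is the Claim_ definition above) =====
theorem get_power_of3_spec : Claim_equal_get_power_of3 := by
  intro x _ hpre
  obtain ⟨h1, h2⟩ := hpre
  unfold Spec_get_power_of3
  interval_cases x <;> decide
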